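-- pv_equiv track=rewrite | github.com/kaisjessa/Project-Euler | pe142.py | get_pair_dicts
-- ===== SOURCE A (Python) =====
-- def square_list(upper):
--     return [n**2 for n in range(upper)]
--
-- def get_pair_dicts(upper):
--     A = {}
--     B = {}
--     sq = square_list(upper)
--     for i in range(1, len(sq)):
--         for j in range(i + 1, len(sq)):
--             n = sq[j]
--             m = sq[i]
--             if (n + m) % 2 == 0:
--                 A[(n + m) // 2] = A.get((n + m) // 2, [])
--                 A[(n + m) // 2].append((n, m))
--                 B[(n - m) // 2] = B.get((n - m) // 2, [])
--                 B[(n - m) // 2].append((n, m))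
--     return (A, B)
-- ===== SOURCE B (Python) =====
-- def get_pair_dicts(upper):
--     # Enumerate the valid pairs first (same-parity indices i < j, stride-2 inner
--     # range, no squaring/modulo test needed), then group them into the two dicts
--     # in a single pass.
--     pairs = [(j * j, i * i)
--              for i in range(1, upper)
--              for j in range(i + 2, upper, 2)]
--     A = {}
--     B = {}
--     for n, m in pairs:
--         A.setdefault((n + m) // 2, []).append((n, m))
--         B.setdefault((n - m) // 2, []).append((n, m))
--     return (A, B)
-- ===== Notes on version B (the rewrite author's own statement) =====
-- stated objective: alternative
-- what changed: Replaces A's square-list indexing plus parity test on sums of squares inside interleaved dict updates by a two-phase pipeline: first enumerate exactly the valid (square,square) pairs with a stride-2 inner range (no precomputed square list, no modulo test), then group the flat pair list into the two dicts in one separate pass.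
import Mathlib
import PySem

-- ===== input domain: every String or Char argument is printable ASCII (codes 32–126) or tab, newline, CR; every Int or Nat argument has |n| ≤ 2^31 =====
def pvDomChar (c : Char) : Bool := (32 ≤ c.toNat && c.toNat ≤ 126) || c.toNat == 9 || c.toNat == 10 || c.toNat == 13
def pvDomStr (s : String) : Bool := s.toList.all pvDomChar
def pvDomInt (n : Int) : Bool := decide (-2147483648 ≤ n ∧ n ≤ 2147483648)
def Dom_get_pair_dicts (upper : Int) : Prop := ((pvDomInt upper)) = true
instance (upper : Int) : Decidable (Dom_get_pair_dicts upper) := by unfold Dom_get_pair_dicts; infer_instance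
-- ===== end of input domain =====

-- B replaces A's square-list lookups + parity test on sums of squares by a two-phase
-- pipeline (enumerate valid pairs with a stride-2 range, then group them); objective:
-- alternative decomposition, same asymptotic cost.

-- ===== PORT A =====
def square_list (upper : Int) : List Int :=
  (PySem.List.pyRange 0 upper).map (fun n => n ^ 2)

-- body of A's inner 'for j' loop
def pvABody (sq : List Int) (i : Int)
    (st : PySem.Dict Int (List (Int × Int)) × PySem.Dict Int (List (Int × Int))) (j : Int) :
    PySem.Dict Int (List (Int × Int)) × PySem.Dict Int (List (Int × Int)) :=
  let n := PySem.List.pyGetD sq j 0   -- sq[j]; i, j always in range here, so no IndexError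
  let m := PySem.List.pyGetD sq i 0
  if PySem.Int.mod (n + m) 2 == 0 then
    -- A[k] = A.get(k, []); A[k].append((n, m))  ≡  A[k] = A.get(k, []) + [(n, m)], i.e. modify
    let a := st.1.modify (PySem.Int.floordiv (n + m) 2) [] (fun l => l ++ [(n, m)])
    let b := st.2.modify (PySem.Int.floordiv (n - m) 2) [] (fun l => l ++ [(n, m)])
    (a, b)
  else st

-- A's inner 'for j' loop
def pvAInner (sq : List Int) (L : Int)
    (st : PySem.Dict Int (List (Int × Int)) × PySem.Dict Int (List (Int × Int))) (i : Int) :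
    PySem.Dict Int (List (Int × Int)) × PySem.Dict Int (List (Int × Int)) :=
  (PySem.List.pyRange (i + 1) L).foldl (pvABody sq i) st

def get_pair_dicts (upper : Int) : (List (Int × List (Int × Int))) × (List (Int × List (Int × Int))) :=
  let sq := square_list upper
  let st := (PySem.List.pyRange 1 (sq.length : Int)).foldl
    (pvAInner sq (sq.length : Int)) (PySem.Dict.empty, PySem.Dict.empty)
  (st.1.items, st.2.items)

-- ===== PORT B =====
-- the flat pair list B builds first
def pvBPairs (upper : Int) : List (Int × Int) :=
  (PySem.List.pyRange 1 upper).flatMap (fun i =>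
    (PySem.List.pyRange (i + 2) upper 2).map (fun j => (j * j, i * i)))

-- body of B's grouping loop
def pvBStep (st : PySem.Dict Int (List (Int × Int)) × PySem.Dict Int (List (Int × Int)))
    (p : Int × Int) : PySem.Dict Int (List (Int × Int)) × PySem.Dict Int (List (Int × Int)) :=
  let n := p.1
  let m := p.2
  -- A.setdefault(k, []).append((n, m)) = setdefault, then in-place append = modify at k
  let a := (st.1.setdefault (PySem.Int.floordiv (n + m) 2) []).modify
             (PySem.Int.floordiv (n + m) 2) [] (fun l => l ++ [(n, m)])
  let b := (st.2.setdefault (PySem.Int.floordiv (n - m) 2) []).modify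
             (PySem.Int.floordiv (n - m) 2) [] (fun l => l ++ [(n, m)])
  (a, b)

def get_pair_dicts_alt (upper : Int) : (List (Int × List (Int × Int))) × (List (Int × List (Int × Int))) :=
  let pairs := pvBPairs upper
  let st := pairs.foldl pvBStep (PySem.Dict.empty, PySem.Dict.empty)
  (st.1.items, st.2.items)

-- ===== PRECONDITION & SPEC =====
def Spec_get_pair_dicts (upper : Int) (out : (List (Int × List (Int × Int))) × (List (Int × List (Int × Int)))) : Prop := out = get_pair_dicts_alt upper
instance (upper : Int) (out : (List (Int × List (Int × Int))) × (List (Int × List (Int × Int)))) : Decidable (Spec_get_pair_dicts upper out) := by unfold Spec_get_pair_dicts; infer_instance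

-- ===== CLAIM (what is proved, stated in full; the proofs are below) =====
def Claim_equal_get_pair_dicts : Prop := ∀ (upper : Int), Dom_get_pair_dicts upper → Spec_get_pair_dicts upper (get_pair_dicts upper)

-- ===== LEMMAS AND PROOFS =====

-- the common per-pair dict-update step both loops perform
def pvStep (st : PySem.Dict Int (List (Int × Int)) × PySem.Dict Int (List (Int × Int)))
    (p : Int × Int) : PySem.Dict Int (List (Int × Int)) × PySem.Dict Int (List (Int × Int)) :=
  (st.1.modify (PySem.Int.floordiv (p.1 + p.2) 2) [] (fun l => l ++ [p]),
   st.2.modify (PySem.Int.floordiv (p.1 - p.2) 2) [] (fun l => l ++ [p]))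

-- setdefault-then-modify at the same key is just modify
theorem pvSetdefaultModify {κ ν : Type} [BEq κ] [LawfulBEq κ] (d : PySem.Dict κ ν) (k : κ)
    (v : ν) (f : ν → ν) : (d.setdefault k v).modify k v f = d.modify k v f := by
  by_cases h : d.contains k = true
  · rw [PySem.Dict.setdefault_of_contains _ _ h]
  · have h' : d.contains k = false := by simpa using h
    rw [PySem.Dict.setdefault_of_not_contains _ _ h']
    unfold PySem.Dict.modify
    rw [PySem.Dict.getD_insert_self, PySem.Dict.insert_insert_self,
        PySem.Dict.getD_of_not_contains _ _ h']

theorem pvBStep_eq : pvBStep = pvStep := by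
  funext st p
  simp only [pvBStep, pvStep]
  rw [pvSetdefaultModify, pvSetdefaultModify]

-- x² has the parity of x
theorem pvSqParity (x : Int) : (x * x) % 2 = x % 2 := by
  obtain ⟨m, hm⟩ := Int.even_mul_succ_self (x - 1)
  have hx : x * x = x + (m + m) := by linear_combination hm
  omega

-- the Bool test A performs, rephrased on the indices
theorem pvParityBool (i j : Int) :
    (PySem.Int.mod (j * j + i * i) 2 == 0) = (PySem.Int.mod (j - i) 2 == 0) := by
  have h1 := pvSqParity i
  have h2 := pvSqParity j
  rw [Bool.eq_iff_iff]
  simp only [beq_iff_eq, PySem.Int.mod, Int.fmod_eq_emod]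
  omega

theorem pvRangeTwoNil {a u : Int} (h : u ≤ a) : PySem.List.pyRange a u 2 = [] := by
  rw [PySem.List.pyRange_of_pos _ _ (by norm_num : (0:Int) < 2), if_neg (by omega)]
  rfl

theorem pvRangeTwoCons {a u : Int} (h : a < u) :
    PySem.List.pyRange a u 2 = a :: PySem.List.pyRange (a + 2) u 2 := by
  rw [PySem.List.pyRange_of_pos _ _ (by norm_num : (0:Int) < 2),
      PySem.List.pyRange_of_pos _ _ (by norm_num : (0:Int) < 2), if_pos h]
  have hc : ((u - a + 2 - 1) / 2).toNat
      = (if a + 2 < u then ((u - (a + 2) + 2 - 1) / 2).toNat else 0) + 1 := by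
    split_ifs <;> omega
  rw [hc, List.range_succ_eq_map, List.map_cons, List.map_map]
  refine congrArg₂ _ (by simp) ?_
  refine List.map_congr_left fun k _ => ?_
  simp only [Function.comp_apply]
  push_cast
  ring

-- filtering a unit-stride range by "same parity as i" yields a stride-2 range
theorem pvFilterParity (i : Int) : ∀ (n : Nat) (a u : Int), (u - a).toNat ≤ n →
    (PySem.List.pyRange a u 1).filter (fun j => PySem.Int.mod (j * j + i * i) 2 == 0)
      = if PySem.Int.mod (a - i) 2 == 0 then PySem.List.pyRange a u 2
        else PySem.List.pyRange (a + 1) u 2 := by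
  intro n
  induction n with
  | zero =>
    intro a u h
    rw [PySem.List.pyRange_one_eq_nil (by omega)]
    split_ifs <;> rw [pvRangeTwoNil (by omega)] <;> rfl
  | succ n ih =>
    intro a u h
    by_cases hau : u ≤ a
    · rw [PySem.List.pyRange_one_eq_nil hau]
      split_ifs <;> rw [pvRangeTwoNil (by omega)] <;> rfl
    · rw [Int.not_le] at hau
      rw [PySem.List.pyRange_one_cons hau, List.filter_cons, pvParityBool,
          ih (a + 1) u (by omega)]
      have hflip : (PySem.Int.mod (a + 1 - i) 2 == 0) = !(PySem.Int.mod (a - i) 2 == 0) := by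
        rw [Bool.eq_iff_iff]
        simp only [beq_iff_eq, Bool.not_eq_eq_eq_not, Bool.not_true, beq_eq_false_iff_ne,
          ne_eq, PySem.Int.mod, Int.fmod_eq_emod]
        omega
      rw [hflip]
      have h2 : a + 1 + 1 = a + 2 := by ring
      by_cases hpar : (PySem.Int.mod (a - i) 2 == 0) = true
      · rw [hpar]
        simp [h2, pvRangeTwoCons hau]
      · have hf : (PySem.Int.mod (a - i) 2 == 0) = false := by simpa using hpar
        rw [hf]
        simp
-- sq[j] is j*j
theorem pvSqGet (upper j : Int) (h0 : 0 ≤ j) (h1 : j < upper) :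
    PySem.List.pyGetD (square_list upper) j 0 = j * j := by
  unfold square_list
  rw [PySem.List.pyGetD_map_pyRange_of_nonneg _ _ _ _ h0 h1]
  ring

theorem pvMain (upper : Int) : get_pair_dicts upper = get_pair_dicts_alt upper := by
  simp only [get_pair_dicts, get_pair_dicts_alt]
  by_cases hu : upper ≤ 1
  · have h1 : ((square_list upper).length : Int) ≤ 1 := by
      simp only [square_list, List.length_map, PySem.List.length_pyRange_one]
      omega
    rw [PySem.List.pyRange_one_eq_nil h1]
    unfold pvBPairs
    rw [PySem.List.pyRange_one_eq_nil hu]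
    rfl
  · rw [Int.not_le] at hu
    have hlen : ((square_list upper).length : Int) = upper := by
      simp only [square_list, List.length_map, PySem.List.length_pyRange_one]
      omega
    rw [hlen]
    suffices h : (PySem.List.pyRange 1 upper).foldl (pvAInner (square_list upper) upper)
        (PySem.Dict.empty, PySem.Dict.empty)
        = (pvBPairs upper).foldl pvBStep (PySem.Dict.empty, PySem.Dict.empty) by
      rw [h]
    rw [pvBStep_eq]
    unfold pvBPairs
    rw [List.foldl_flatMap]
    simp only [List.foldl_map]
    apply PySem.List.foldl_congr_mem
    intro acc i hi
    rw [PySem.List.mem_pyRange_one] at hi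
    unfold pvAInner
    have hbody : ∀ (acc2 : PySem.Dict Int (List (Int × Int)) × PySem.Dict Int (List (Int × Int)))
        (j : Int), j ∈ PySem.List.pyRange (i + 1) upper →
        pvABody (square_list upper) i acc2 j
          = if PySem.Int.mod (j * j + i * i) 2 == 0 then pvStep acc2 (j * j, i * i) else acc2 := by
      intro acc2 j hj
      rw [PySem.List.mem_pyRange_one] at hj
      unfold pvABody
      simp only [pvSqGet upper j (by omega) (by omega), pvSqGet upper i (by omega) (by omega)]
      rfl
    rw [PySem.List.foldl_congr_mem _ _ _ _ hbody,
        PySem.List.foldl_if_eq_foldl_filter (fun j => PySem.Int.mod (j * j + i * i) 2 == 0)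
          (fun acc2 j => pvStep acc2 (j * j, i * i)),
        pvFilterParity i (upper - (i + 1)).toNat (i + 1) upper le_rfl,
        if_neg (by
          simp only [beq_iff_eq, PySem.Int.mod]
          rw [Int.fmod_eq_emod]
          omega),
        show i + 1 + 1 = i + 2 by ring]

-- ===== VERDICT (by name: the statement is the Claim_ definition above) =====
theorem get_pair_dicts_spec : Claim_equal_get_pair_dicts := by
  intro upper _
  unfold Spec_get_pair_dicts
  exact pvMain upper
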